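-- pv_equiv track=rewrite | github.com/StewartJake/Full_Stack | python/code_breaker.py | compare_user_comp
-- ===== SOURCE A (Python) =====
-- def compare_user_comp(user_tpl, cmp_tpl):
--     """
--     Fn: checks two tuples for simililarities
--     Arg: 2 tuples
--     Ret: a string that interprets the relationship between the two
--     """
--     msgs = ('close ', 'match ', 'nope')
--     out_msg = ""
--     for item in user_tpl:
--         if (item in cmp_tpl
--                 and user_tpl.index(item) != cmp_tpl.index(item)):
--             out_msg += msgs[0]
--             break
--     for item in user_tpl:
--         if (item in cmp_tpl
--                 and user_tpl.index(item) == cmp_tpl.index(item)):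
--             out_msg +=  msgs[1]
--             break
--     if out_msg == "":
--         out_msg += msgs[2]
--     if user_tpl == cmp_tpl:
--         out_msg = msgs[3]
--     return out_msg
-- ===== SOURCE B (Python) =====
-- def compare_user_comp(user_tpl, cmp_tpl):
--     """
--     Fn: checks two tuples for simililarities
--     Arg: 2 tuples
--     Ret: a string that interprets the relationship between the two
--     """
--     # Single lockstep positional scan: walk the positions of user_tpl once,
--     # carrying "seen so far" sets for both tuples (and the full value set of
--     # cmp_tpl).  A value v = user_tpl[i] is a first occurrence in user_tpl iff
--     # v is not in seen_u; its first occurrence in cmp_tpl is at this same i iff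
--     # cmp_tpl[i] == v and v is not in seen_c (-> match), and otherwise, if v
--     # occurs anywhere in cmp_tpl, its first indices differ (-> close).
--     cmp_values = set(cmp_tpl)
--     seen_u = set()
--     seen_c = set()
--     close = False
--     match = False
--     for i, v in enumerate(user_tpl):
--         if v not in seen_u:
--             if i < len(cmp_tpl) and cmp_tpl[i] == v and v not in seen_c:
--                 match = True
--             elif v in cmp_values:
--                 close = True
--         seen_u.add(v)
--         if i < len(cmp_tpl):
--             seen_c.add(cmp_tpl[i])
--     out = ('close ' if close else '') + ('match ' if match else '')
--     return out if out else 'nope'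
-- ===== Notes on version B (the rewrite author's own statement) =====
-- stated objective: faster
-- what changed: Replaces A's two break-loops with their quadratic repeated .index/'in' scans by a single lockstep positional pass over enumerate(user_tpl) that carries seen-so-far sets for both tuples (a value at position i is a first occurrence iff unseen, and matches iff cmp_tpl[i] equals it and is itself unseen); Pre_ excludes equal tuples, on which A raises IndexError.
import Mathlib
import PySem

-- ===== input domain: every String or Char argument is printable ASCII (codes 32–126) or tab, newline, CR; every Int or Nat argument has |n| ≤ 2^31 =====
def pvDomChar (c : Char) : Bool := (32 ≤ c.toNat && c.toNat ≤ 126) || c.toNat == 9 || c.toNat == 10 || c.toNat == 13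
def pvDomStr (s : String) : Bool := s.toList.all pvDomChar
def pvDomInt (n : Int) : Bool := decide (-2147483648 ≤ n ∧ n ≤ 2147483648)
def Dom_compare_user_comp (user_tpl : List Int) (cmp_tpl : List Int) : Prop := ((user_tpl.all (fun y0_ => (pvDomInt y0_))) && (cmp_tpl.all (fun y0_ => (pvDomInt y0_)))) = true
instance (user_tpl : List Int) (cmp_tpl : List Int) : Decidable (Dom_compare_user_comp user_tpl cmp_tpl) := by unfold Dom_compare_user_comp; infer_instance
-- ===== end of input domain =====

-- B replaces A's two break-loops of repeated .index/'in' scans by ONE lockstep positional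
-- pass over enumerate(user_tpl) carrying seen-so-far sets for both tuples (objective: faster).

-- ===== PORT A =====
-- first for-loop of A: break as soon as an item of user_tpl is in cmp_tpl with differing .index
def pvCloseScan (u c : List Int) : List Int → Bool
  | [] => false
  | x :: xs =>
      if c.contains x && (PySem.List.index? u x ≠ PySem.List.index? c x) then true
      else pvCloseScan u c xs

-- second for-loop of A: break on an item in both with equal .index
def pvMatchScan (u c : List Int) : List Int → Bool
  | [] => false
  | x :: xs =>
      if c.contains x && (PySem.List.index? u x = PySem.List.index? c x) then true
      else pvMatchScan u c xs

-- Python A raises IndexError (msgs[3]) when user_tpl == cmp_tpl; that case is excluded by Pre_.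
def compare_user_comp (user_tpl : List Int) (cmp_tpl : List Int) : String :=
  let m0 : String := if pvCloseScan user_tpl cmp_tpl user_tpl then "" ++ "close " else ""
  let m1 : String := if pvMatchScan user_tpl cmp_tpl user_tpl then m0 ++ "match " else m0
  if m1 = "" then m1 ++ "nope" else m1

-- ===== PORT B =====
-- B's single for-loop over enumerate(user_tpl): state = (seen_u, seen_c, close, match).
-- `i < len(cmp_tpl) and cmp_tpl[i] == v` is ported as `cmp[i]? == some v` (exact: the
-- subscript is guarded by the bound, and getElem? is some exactly when i < length);
-- `if i < len(cmp_tpl): seen_c.add(cmp_tpl[i])` is the match on cmp[i]? below.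
def pvLoopB (cmp : List Int) (cvals : PySem.Set Int) :
    List Int → Nat → PySem.Set Int → PySem.Set Int → Bool → Bool → Bool × Bool
  | [], _, _, _, cl, ma => (cl, ma)
  | v :: rest, i, su, sc, cl, ma =>
      let st :=
        if !(PySem.Set.contains su v) then
          if (cmp[i]? == some v) && !(PySem.Set.contains sc v) then (cl, true)
          else if PySem.Set.contains cvals v then (true, ma)
          else (cl, ma)
        else (cl, ma)
      pvLoopB cmp cvals rest (i + 1) (PySem.Set.add su v)
        (match cmp[i]? with | some w => PySem.Set.add sc w | none => sc) st.1 st.2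

def compare_user_comp_alt (user_tpl : List Int) (cmp_tpl : List Int) : String :=
  let cvals := PySem.Set.ofList cmp_tpl
  let fl := pvLoopB cmp_tpl cvals user_tpl 0 PySem.Set.empty PySem.Set.empty false false
  let out := (if fl.1 then "close " else "") ++ (if fl.2 then "match " else "")
  if out = "" then "nope" else out

-- ===== PRECONDITION & SPEC =====
-- Pre_ excludes exactly user_tpl = cmp_tpl: there Python A executes msgs[3] on a 3-element
-- tuple and raises IndexError (it returns no value there).
def Pre_compare_user_comp (user_tpl : List Int) (cmp_tpl : List Int) : Prop :=
  user_tpl ≠ cmp_tpl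
instance (user_tpl : List Int) (cmp_tpl : List Int) : Decidable (Pre_compare_user_comp user_tpl cmp_tpl) := by unfold Pre_compare_user_comp; infer_instance

def pvWitness_compare_user_comp : List Int × List Int := ([1, 2, 3], [3, 2, 1])

def Spec_compare_user_comp (user_tpl : List Int) (cmp_tpl : List Int) (out : String) : Prop := out = compare_user_comp_alt user_tpl cmp_tpl
instance (user_tpl : List Int) (cmp_tpl : List Int) (out : String) : Decidable (Spec_compare_user_comp user_tpl cmp_tpl out) := by unfold Spec_compare_user_comp; infer_instance

-- ===== CLAIM (what is proved, stated in full; the proofs are below) =====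
def Claim_equal_compare_user_comp : Prop := ∀ (user_tpl : List Int) (cmp_tpl : List Int), Dom_compare_user_comp user_tpl cmp_tpl → Pre_compare_user_comp user_tpl cmp_tpl → Spec_compare_user_comp user_tpl cmp_tpl (compare_user_comp user_tpl cmp_tpl)
-- ===== LEMMAS AND PROOFS =====

def pvRemCl (u cs : List Int) (i : Nat) : Bool :=
  u.any (fun v => cs.contains v && !(PySem.List.index? u v == PySem.List.index? cs v)
                  && (PySem.List.index? u v).any (fun k => decide (i ≤ k)))

def pvRemMa (u cs : List Int) (i : Nat) : Bool :=
  u.any (fun v => cs.contains v && (PySem.List.index? u v == PySem.List.index? cs v)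
                  && (PySem.List.index? u v).any (fun k => decide (i ≤ k)))

theorem remCl_iff (u cs : List Int) (i : Nat) :
    pvRemCl u cs i = true ↔ ∃ x ∈ u, x ∈ cs ∧ List.idxOf? x u ≠ List.idxOf? x cs ∧
      ∃ k, List.idxOf? x u = some k ∧ i ≤ k := by
  simp only [pvRemCl, List.contains_eq_mem, PySem.List.index?_eq_idxOf?, List.any_eq_true, Bool.and_eq_true,
    decide_eq_true_eq, Bool.not_eq_eq_eq_not, Bool.not_true, beq_eq_false_iff_ne, ne_eq, Option.any_eq_true]
  constructor
  · rintro ⟨x, hx, ⟨h1, h2⟩, k, hk, hik⟩; exact ⟨x, hx, h1, h2, k, hk, hik⟩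
  · rintro ⟨x, hx, h1, h2, k, hk, hik⟩; exact ⟨x, hx, ⟨h1, h2⟩, k, hk, hik⟩

theorem remMa_iff (u cs : List Int) (i : Nat) :
    pvRemMa u cs i = true ↔ ∃ x ∈ u, x ∈ cs ∧ List.idxOf? x u = List.idxOf? x cs ∧
      ∃ k, List.idxOf? x u = some k ∧ i ≤ k := by
  simp only [pvRemMa, List.contains_eq_mem, PySem.List.index?_eq_idxOf?, List.any_eq_true, Bool.and_eq_true,
    decide_eq_true_eq, beq_iff_eq, Option.any_eq_true]
  constructor
  · rintro ⟨x, hx, ⟨h1, h2⟩, k, hk, hik⟩; exact ⟨x, hx, h1, h2, k, hk, hik⟩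
  · rintro ⟨x, hx, h1, h2, k, hk, hik⟩; exact ⟨x, hx, ⟨h1, h2⟩, k, hk, hik⟩

theorem idx_some_iff (cs : List Int) (v : Int) (i : Nat) :
    List.idxOf? v cs = some i ↔ cs[i]? = some v ∧ v ∉ cs.take i := by
  rw [← PySem.List.index?_eq_idxOf?]
  constructor
  · intro h
    obtain ⟨pre, suf, hdec, hlen, hpre⟩ := (PySem.List.index?_eq_some_iff cs v i).mp h
    subst hdec
    constructor
    · rw [List.getElem?_append_right (by omega), ← hlen]
      simp
    · rw [List.take_append_of_le_length (by omega), ← hlen]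
      simp [hpre]
  · rintro ⟨hget, htake⟩
    have hi : i < cs.length := by
      by_contra hlt
      rw [List.getElem?_eq_none (by omega)] at hget
      simp at hget
    refine (PySem.List.index?_eq_some_iff cs v i).mpr ⟨cs.take i, cs.drop (i + 1), ?_, by simp [Nat.le_of_lt hi], htake⟩
    rw [List.getElem?_eq_getElem hi, Option.some.injEq] at hget
    rw [← hget]
    have h2 : cs.take i ++ cs[i] :: cs.drop (i + 1) = cs := by
      rw [List.getElem_cons_drop]
      exact List.take_append_drop ..
    exact h2.symm

theorem idx_mem {cs : List Int} {v : Int} {i : Nat} (h : List.idxOf? v cs = some i) : v ∈ cs := by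
  have := PySem.List.index?_isSome_iff cs v
  rw [PySem.List.index?_eq_idxOf?] at this
  simp [h] at this
  exact this

theorem idx_lt {cs : List Int} {v : Int} {i : Nat} (h : List.idxOf? v cs = some i) : i < cs.length := by
  have := (idx_some_iff cs v i).mp h
  by_contra hge
  rw [List.getElem?_eq_none (by omega)] at this
  simp at this

theorem pvRemCl_split (u cs : List Int) (i : Nat) (v : Int) (hv : u[i]? = some v) :
    pvRemCl u cs i =
      (((!(u.take i).contains v) && cs.contains v && !(List.idxOf? v cs == some i))
        || pvRemCl u cs (i + 1)) := by
  rw [Bool.eq_iff_iff, Bool.or_eq_true, remCl_iff, remCl_iff]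
  have hhead : ((!(u.take i).contains v && cs.contains v && !(List.idxOf? v cs == some i)) = true)
      ↔ (v ∉ u.take i ∧ v ∈ cs ∧ List.idxOf? v cs ≠ some i) := by
    simp [and_assoc]
  rw [hhead]
  constructor
  · rintro ⟨x, hx, hxc, hne, k, hk, hik⟩
    rcases Nat.eq_or_lt_of_le hik with heq | hlt
    · rw [← heq] at hk
      obtain ⟨hget, htake⟩ := (idx_some_iff u x i).mp hk
      rw [hv, Option.some.injEq] at hget
      subst hget
      exact Or.inl ⟨htake, hxc, fun h => hne (hk.trans h.symm)⟩
    · exact Or.inr ⟨x, hx, hxc, hne, k, hk, by omega⟩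
  · rintro (⟨htake, hci, hne⟩ | ⟨x, hx, hxc, hne, k, hk, hik⟩)
    · have hku : List.idxOf? v u = some i := (idx_some_iff u v i).mpr ⟨hv, htake⟩
      exact ⟨v, List.mem_of_getElem? hv, hci, by rw [hku]; exact fun h => hne h.symm, i, hku, le_refl _⟩
    · exact ⟨x, hx, hxc, hne, k, hk, by omega⟩

theorem pvRemMa_split (u cs : List Int) (i : Nat) (v : Int) (hv : u[i]? = some v) :
    pvRemMa u cs i =
      (((!(u.take i).contains v) && (List.idxOf? v cs == some i))
        || pvRemMa u cs (i + 1)) := by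
  rw [Bool.eq_iff_iff, Bool.or_eq_true, remMa_iff, remMa_iff]
  have hhead : ((!(u.take i).contains v && (List.idxOf? v cs == some i)) = true)
      ↔ (v ∉ u.take i ∧ List.idxOf? v cs = some i) := by
    simp
  rw [hhead]
  constructor
  · rintro ⟨x, hx, hxc, heq, k, hk, hik⟩
    rcases Nat.eq_or_lt_of_le hik with hek | hlt
    · rw [← hek] at hk
      obtain ⟨hget, htake⟩ := (idx_some_iff u x i).mp hk
      rw [hv, Option.some.injEq] at hget
      subst hget
      exact Or.inl ⟨htake, heq ▸ hk⟩
    · exact Or.inr ⟨x, hx, hxc, heq, k, hk, by omega⟩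
  · rintro (⟨htake, hci⟩ | ⟨x, hx, hxc, heq, k, hk, hik⟩)
    · have hku : List.idxOf? v u = some i := (idx_some_iff u v i).mpr ⟨hv, htake⟩
      exact ⟨v, List.mem_of_getElem? hv, idx_mem hci, by rw [hku, hci], i, hku, le_refl _⟩
    · exact ⟨x, hx, hxc, heq, k, hk, by omega⟩

theorem pvRem_end_cl (u cs : List Int) : pvRemCl u cs u.length = false := by
  rw [← Bool.not_eq_true, remCl_iff]
  rintro ⟨x, hx, hxc, hne, k, hk, hik⟩
  exact absurd (idx_lt hk) (by omega)

theorem pvRem_end_ma (u cs : List Int) : pvRemMa u cs u.length = false := by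
  rw [← Bool.not_eq_true, remMa_iff]
  rintro ⟨x, hx, hxc, hne, k, hk, hik⟩
  exact absurd (idx_lt hk) (by omega)

theorem pvLoopB_inv (cs : List Int) (cvals : PySem.Set Int) (u : List Int)
    (hcv : ∀ x : Int, x ∈ cvals ↔ x ∈ cs) :
    ∀ (rest pre : List Int) (su sc : PySem.Set Int) (cl ma : Bool),
    u = pre ++ rest →
    (∀ x : Int, x ∈ su ↔ x ∈ pre) →
    (∀ x : Int, x ∈ sc ↔ x ∈ cs.take pre.length) →
    pvLoopB cs cvals rest pre.length su sc cl ma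
      = (cl || pvRemCl u cs pre.length, ma || pvRemMa u cs pre.length) := by
  intro rest
  induction rest with
  | nil =>
    intro pre su sc cl ma hu _ _
    subst hu
    simp only [List.append_nil]
    rw [pvLoopB, pvRem_end_cl, pvRem_end_ma]
    simp
  | cons v rest' ih =>
    intro pre su sc cl ma hu hsu hsc
    have hv : u[pre.length]? = some v := by
      subst hu
      rw [List.getElem?_append_right (Nat.le_refl _)]
      simp
    have htake : u.take pre.length = pre := by
      subst hu; simp
    have hsplitCl := pvRemCl_split u cs pre.length v hv
    have hsplitMa := pvRemMa_split u cs pre.length v hv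
    have hu' : u = (pre ++ [v]) ++ rest' := by simp [hu]
    have hsu' : ∀ x : Int, x ∈ PySem.Set.add su v ↔ x ∈ pre ++ [v] := by
      intro x
      rw [PySem.Set.mem_add, hsu]
      simp
    have hsc' : ∀ x : Int, x ∈
        (match cs[pre.length]? with | some w => PySem.Set.add sc w | none => sc)
        ↔ x ∈ cs.take ((pre ++ [v]).length) := by
      intro x
      rw [List.length_append, List.length_cons, List.length_nil]
      cases hc : cs[pre.length]? with
      | none =>
        have hge : cs.length ≤ pre.length := by
          by_contra hlt
          rw [List.getElem?_eq_getElem (by omega)] at hc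
          simp at hc
        simp only
        rw [hsc, List.take_of_length_le hge, List.take_of_length_le (by omega)]
      | some w =>
        have h2 : cs.take (pre.length + 1) = cs.take pre.length ++ [w] := by
          rw [List.take_succ, hc]
          simp
        simp only
        rw [PySem.Set.mem_add, hsc, h2]
        simp
    have hrec := fun cl' ma' => ih (pre ++ [v]) (PySem.Set.add su v)
        (match cs[pre.length]? with | some w => PySem.Set.add sc w | none => sc) cl' ma'
        hu' hsu' hsc'
    rw [List.length_append, List.length_cons, List.length_nil] at hrec
    rw [pvLoopB]
    have hbsu : PySem.Set.contains su v = decide (v ∈ pre) := by simp [hsu]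
    have hbsc : PySem.Set.contains sc v = decide (v ∈ cs.take pre.length) := by simp [hsc]
    have hbcv : PySem.Set.contains cvals v = decide (v ∈ cs) := by simp [hcv]
    have hmcond : ((cs[pre.length]? == some v) && !(PySem.Set.contains sc v))
        = (List.idxOf? v cs == some pre.length) := by
      rw [hbsc, Bool.eq_iff_iff]
      simp only [Bool.and_eq_true, beq_iff_eq, Bool.not_eq_eq_eq_not, Bool.not_true,
        decide_eq_false_iff_not]
      rw [idx_some_iff]
    rw [hsplitCl, hsplitMa, htake]
    simp only [hbsu, hmcond, hbcv]
    by_cases h1 : v ∈ pre <;>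
      by_cases h2 : (List.idxOf? v cs == some pre.length) = true <;>
      by_cases h3 : v ∈ cs
    all_goals first
      | exact absurd (idx_mem (by simpa using h2)) h3
      | (try rw [Bool.not_eq_true] at h2
         simp [hrec, h1, h2, h3])

theorem pvCloseScan_eq_any (u cs l : List Int) :
    pvCloseScan u cs l = l.any (fun x => cs.contains x && (PySem.List.index? u x ≠ PySem.List.index? cs x)) := by
  induction l with
  | nil => rfl
  | cons x xs ih =>
    simp only [pvCloseScan, ih, List.any_cons]
    split_ifs with h <;> simp_all

theorem pvMatchScan_eq_any (u cs l : List Int) :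
    pvMatchScan u cs l = l.any (fun x => cs.contains x && (PySem.List.index? u x = PySem.List.index? cs x)) := by
  induction l with
  | nil => rfl
  | cons x xs ih =>
    simp only [pvMatchScan, ih, List.any_cons]
    split_ifs with h <;> simp_all

theorem pvRemCl_zero (u cs : List Int) : pvRemCl u cs 0 = pvCloseScan u cs u := by
  rw [pvCloseScan_eq_any, Bool.eq_iff_iff, pvRemCl]
  simp only [List.any_eq_true]
  constructor <;> rintro ⟨x, hx, hp⟩ <;> refine ⟨x, hx, ?_⟩ <;>
    [skip; skip] <;>
    (have hs : (PySem.List.index? u x).isSome := (PySem.List.index?_isSome_iff u x).mpr hx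
     cases hux : PySem.List.index? u x with
     | none => rw [hux] at hs; simp at hs
     | some k => rw [PySem.List.index?_eq_idxOf?] at hux; simpa [hux, hx] using hp)

theorem pvRemMa_zero (u cs : List Int) : pvRemMa u cs 0 = pvMatchScan u cs u := by
  rw [pvMatchScan_eq_any, Bool.eq_iff_iff, pvRemMa]
  simp only [List.any_eq_true]
  constructor <;> rintro ⟨x, hx, hp⟩ <;> refine ⟨x, hx, ?_⟩ <;>
    [skip; skip] <;>
    (have hs : (PySem.List.index? u x).isSome := (PySem.List.index?_isSome_iff u x).mpr hx
     cases hux : PySem.List.index? u x with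
     | none => rw [hux] at hs; simp at hs
     | some k => rw [PySem.List.index?_eq_idxOf?] at hux; simpa [hux, hx] using hp)

def pvAsmA (b1 b2 : Bool) : String :=
  let m0 : String := if b1 then "" ++ "close " else ""
  let m1 : String := if b2 then m0 ++ "match " else m0
  if m1 = "" then m1 ++ "nope" else m1

def pvAsmB (p : Bool × Bool) : String :=
  let out := (if p.1 then "close " else "") ++ (if p.2 then "match " else "")
  if out = "" then "nope" else out

theorem pvAsm_eq : ∀ b1 b2 : Bool, pvAsmA b1 b2 = pvAsmB (b1, b2) := by decide

-- ===== VERDICT (by name: the statement is the Claim_ definition above) =====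
theorem compare_user_comp_spec : Claim_equal_compare_user_comp := by
  intro u cs _ _
  have hA : compare_user_comp u cs = pvAsmA (pvCloseScan u cs u) (pvMatchScan u cs u) := rfl
  have hB : compare_user_comp_alt u cs =
      pvAsmB (pvLoopB cs (PySem.Set.ofList cs) u 0 PySem.Set.empty PySem.Set.empty false false) := rfl
  have hloop := pvLoopB_inv cs (PySem.Set.ofList cs) u
      (fun x => PySem.Set.mem_ofList cs x) u [] PySem.Set.empty PySem.Set.empty
      false false rfl (fun x => by simp [PySem.Set.empty]) (fun x => by simp [PySem.Set.empty])
  simp only [List.length_nil] at hloop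
  unfold Spec_compare_user_comp
  rw [hA, hB, hloop, Bool.false_or, Bool.false_or, pvRemCl_zero, pvRemMa_zero, pvAsm_eq]
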